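-- pv_equiv track=rewrite | github.com/alexjercan/aoc-2018 | src/day12.py | count_num_index
-- ===== SOURCE A (Python) =====
-- def indices(lst, element):
--   result = []
--   offset = -1
--   while True:
--     try:
--       offset = lst.index(element, offset+1)
--     except ValueError:
--       return result
--     result.append(offset)
--
-- def count_num_index(current_state, rules, num_gens):
--   for _ in range(num_gens):
--     current_state = "..." + current_state + "..."
--     aux_state = ""
--     for i in range(len(current_state) - 4):
--       aux_state += rules.get(current_state[i:i+5], ".")
--
--     current_state = aux_state
--
--   return sum(map(lambda idx: idx - num_gens, indices(list(current_state), "#")))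
-- ===== SOURCE B (Python) =====
-- def count_num_index(current_state, rules, num_gens):
--     def step(state):
--         padded = "..." + state + "..."
--         return "".join(rules.get(padded[i:i+5], ".") for i in range(len(padded) - 4))
--
--     seen = {}
--     state = current_state
--     gen = 0
--     while gen < num_gens:
--         prev = seen.get(state)
--         if prev is not None:
--             period = gen - prev
--             rem = (num_gens - gen) % period
--             for _ in range(rem):
--                 state = step(state)
--             break
--         seen[state] = gen
--         state = step(state)
--         gen += 1
--
--     total = 0
--     for i, c in enumerate(state):
--         if c == '#':
--             total += i - num_gens
--     return total
-- ===== Notes on version B (the rewrite author's own statement) =====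
-- stated objective: alternative
-- what changed: B detects a repeated automaton state with a dict (state -> generation) and extrapolates by the cycle period instead of simulating every remaining generation, and computes the index sum in one enumerate pass instead of building an index list via repeated list.index calls.
import Mathlib
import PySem

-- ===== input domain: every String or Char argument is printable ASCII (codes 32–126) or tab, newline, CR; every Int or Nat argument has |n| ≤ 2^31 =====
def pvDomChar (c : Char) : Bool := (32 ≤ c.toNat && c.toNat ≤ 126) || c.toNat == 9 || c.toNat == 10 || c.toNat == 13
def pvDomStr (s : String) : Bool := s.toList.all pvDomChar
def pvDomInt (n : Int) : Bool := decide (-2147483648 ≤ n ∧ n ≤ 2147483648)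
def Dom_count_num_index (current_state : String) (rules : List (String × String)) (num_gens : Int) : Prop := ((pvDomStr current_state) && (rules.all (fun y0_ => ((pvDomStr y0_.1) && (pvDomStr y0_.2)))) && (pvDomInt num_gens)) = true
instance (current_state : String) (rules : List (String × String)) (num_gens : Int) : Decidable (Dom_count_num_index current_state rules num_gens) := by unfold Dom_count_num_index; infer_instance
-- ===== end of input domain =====

-- B replaces A's generation-by-generation simulation with cycle detection on previously
-- seen states (extrapolating by the cycle period) and a single enumerate pass for the sum;
-- objective: alternative (same cost on inputs whose state sequence never repeats).

-- ===== PORT A =====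

-- rules.get(key, ".") on the dict `rules` (unique keys; first match)
def ruleGet (rules : List (String × String)) (key : List Char) : List Char :=
  match rules with
  | [] => ['.']
  | (k, v) :: rest => if k.toList = key then v.toList else ruleGet rest key

-- one iteration of A's outer loop body: pad with "...", rebuild via aux_state +=
def stepA (rules : List (String × String)) (s : List Char) : List Char :=
  let padded := ['.', '.', '.'] ++ s ++ ['.', '.', '.']
  (PySem.List.pyRange 0 ((padded.length : Int) - 4) 1).foldl
    (fun aux i => aux ++ ruleGet rules (PySem.List.slice padded (some i) (some (i + 5)))) []

-- lst.index(e, start) for start ≥ 0 (none = ValueError)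
def idxFrom (lst : List Char) (e : Char) (start : Int) : Option Int :=
  (PySem.List.index? (lst.drop start.toNat) e).map (fun k => start + (k : Int))

-- the `while True` of indices(); fuel bounds the iterations (each found offset is larger)
def indicesLoop (lst : List Char) (e : Char) : Nat → Int → List Int → List Int
  | 0, _, acc => acc
  | fuel + 1, offset, acc =>
    match idxFrom lst e (offset + 1) with
    | none => acc
    | some j => indicesLoop lst e fuel j (acc ++ [j])

def indicesA (lst : List Char) (e : Char) : List Int :=
  indicesLoop lst e (lst.length + 1) (-1) []

def count_num_index (current_state : String) (rules : List (String × String)) (num_gens : Int) : Int :=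
  let final := (PySem.List.pyRange 0 num_gens 1).foldl (fun st _ => stepA rules st) current_state.toList
  ((indicesA final '#').map (fun idx => idx - num_gens)).sum

-- ===== PORT B =====

-- B's step(state): "".join(rules.get(padded[i:i+5], ".") for i in range(len(padded)-4))
def stepB (rules : List (String × String)) (s : List Char) : List Char :=
  let padded := ['.', '.', '.'] ++ s ++ ['.', '.', '.']
  ((PySem.List.pyRange 0 ((padded.length : Int) - 4) 1).map
    (fun i => ruleGet rules (PySem.List.slice padded (some i) (some (i + 5))))).flatten

-- for _ in range(rem): state = step(state)
def iterStepB (rules : List (String × String)) : Nat → List Char → List Char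
  | 0, s => s
  | k + 1, s => iterStepB rules k (stepB rules s)

-- the while loop: seen maps state → generation; on a repeat, jump by (num_gens-gen) % period.
-- fuel = num_gens.toNat bounds the iterations (gen increases by 1 each time).
def bLoop (rules : List (String × String)) (n : Int) :
    Nat → Int → List Char → PySem.Dict (List Char) Int → List Char
  | 0, _, state, _ => state
  | fuel + 1, gen, state, seen =>
    if gen < n then
      match seen.get? state with
      | some i => iterStepB rules (PySem.Int.mod (n - gen) (gen - i)).toNat state
      | none => bLoop rules n fuel (gen + 1) (stepB rules state) (seen.insert state gen)
    else state

def count_num_index_alt (current_state : String) (rules : List (String × String)) (num_gens : Int) : Int :=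
  let final := bLoop rules num_gens num_gens.toNat 0 current_state.toList PySem.Dict.empty
  (PySem.List.enumerate final 0).foldl
    (fun t p => if p.2 = '#' then t + (p.1 - num_gens) else t) 0

-- ===== PRECONDITION & SPEC =====
def Spec_count_num_index (current_state : String) (rules : List (String × String)) (num_gens : Int) (out : Int) : Prop := out = count_num_index_alt current_state rules num_gens
instance (current_state : String) (rules : List (String × String)) (num_gens : Int) (out : Int) : Decidable (Spec_count_num_index current_state rules num_gens out) := by unfold Spec_count_num_index; infer_instance

-- ===== CLAIM (what is proved, stated in full; the proofs are below) =====
def Claim_equal_count_num_index : Prop := ∀ (current_state : String) (rules : List (String × String)) (num_gens : Int), Dom_count_num_index current_state rules num_gens → Spec_count_num_index current_state rules num_gens (count_num_index current_state rules num_gens)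

-- ===== LEMMAS AND PROOFS =====

lemma stepA_eq_stepB (rules : List (String × String)) (s : List Char) :
    stepA rules s = stepB rules s := by
  unfold stepA stepB
  rw [PySem.List.foldl_append_eq_flatMap]
  simp [List.flatMap_def]

lemma foldl_const_iterate {α β : Type} (f : α → α) (l : List β) (s : α) :
    l.foldl (fun a _ => f a) s = f^[l.length] s := by
  induction l generalizing s with
  | nil => rfl
  | cons x t ih => simp [List.foldl_cons, ih, Function.iterate_succ_apply]

lemma iterStepB_eq (rules : List (String × String)) (k : Nat) (s : List Char) :
    iterStepB rules k s = (stepB rules)^[k] s := by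
  induction k generalizing s with
  | zero => rfl
  | succ k ih => simp [iterStepB, ih, Function.iterate_succ_apply]

lemma iterate_mod {α : Type} (f : α → α) (x : α) (p : Nat) (_hp : 0 < p)
    (hfix : f^[p] x = x) (m : Nat) : f^[m] x = f^[m % p] x := by
  conv_lhs => rw [← Nat.mod_add_div m p]
  rw [Function.iterate_add_apply, Function.iterate_mul, Function.iterate_fixed hfix]

lemma bLoop_eq (rules : List (String × String)) (n : Int) (s0 : List Char) :
    ∀ (fuel g : Nat) (seen : PySem.Dict (List Char) Int),
      g ≤ n.toNat → n.toNat ≤ fuel + g →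
      (∀ k v, seen.get? k = some v → ∃ j : Nat, v = (j : Int) ∧ j < g ∧ k = (stepB rules)^[j] s0) →
      bLoop rules n fuel (g : Int) ((stepB rules)^[g] s0) seen = (stepB rules)^[n.toNat] s0 := by
  intro fuel
  induction fuel with
  | zero =>
    intro g seen hg hfuel _
    have : g = n.toNat := by omega
    simp [bLoop, this]
  | succ fuel ih =>
    intro g seen hg hfuel hseen
    by_cases h : (g : Int) < n
    · have hglt : g < n.toNat := by omega
      rw [bLoop, if_pos h]
      cases hget : seen.get? ((stepB rules)^[g] s0) with
      | none =>
        have hrec := ih (g + 1) (seen.insert ((stepB rules)^[g] s0) (g : Int))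
          (by omega) (by omega) ?_
        · rw [Function.iterate_succ_apply'] at hrec
          rw [show ((g + 1 : Nat) : Int) = (g : Int) + 1 by push_cast; ring] at hrec
          exact hrec
        · intro k v hkv
          rw [PySem.Dict.get?_insert] at hkv
          by_cases hk : k = (stepB rules)^[g] s0
          · rw [if_pos hk] at hkv
            exact ⟨g, by simpa using hkv.symm, by omega, hk⟩
          · rw [if_neg hk] at hkv
            obtain ⟨j, hj1, hj2, hj3⟩ := hseen k v hkv
            exact ⟨j, hj1, by omega, hj3⟩
      | some i =>
        obtain ⟨j, hji, hjg, hjs⟩ := hseen _ _ hget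
        subst hji
        set f := stepB rules with hf
        show iterStepB rules (PySem.Int.mod (n - (g : Int)) ((g : Int) - (j : Int))).toNat (f^[g] s0)
          = f^[n.toNat] s0
        have hp : 0 < g - j := by omega
        have hfix : f^[g - j] (f^[g] s0) = f^[g] s0 := by
          conv_lhs => rw [hjs, ← Function.iterate_add_apply]
          rw [show g - j + j = g by omega]
        set m : Nat := n.toNat - g with hm
        have hmod : (PySem.Int.mod (n - (g : Int)) ((g : Int) - (j : Int))).toNat = m % (g - j) := by
          have h1 : n - (g : Int) = ((m : Nat) : Int) := by omega
          have h2 : (g : Int) - (j : Int) = (((g - j : Nat)) : Int) := by omega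
          rw [h1, h2, PySem.Int.mod_eq_emod_of_pos (by omega)]
          rw [show ((m : Nat) : Int) % (((g - j : Nat)) : Int) = (((m % (g - j) : Nat)) : Int) by push_cast; ring]
          exact Int.toNat_natCast _
        rw [iterStepB_eq, hmod, ← iterate_mod f _ _ hp hfix m, ← Function.iterate_add_apply]
        rw [show m + g = n.toNat by omega]
    · rw [bLoop, if_neg h]
      have : g = n.toNat := by omega
      rw [this]

-- the list of indices of e in l, in increasing order, as Ints
def occList (l : List Char) (e : Char) : List Int :=
  (PySem.List.enumerate l 0).filterMap (fun p => if p.2 = e then some p.1 else none)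

lemma mem_occList {l : List Char} {e : Char} {x : Int} :
    x ∈ occList l e ↔ ∃ (k : Nat), x = (k : Int) ∧ ∃ (hk : k < l.length), l[k] = e := by
  unfold occList
  simp only [List.mem_filterMap, PySem.List.mem_enumerate_iff]
  constructor
  · rintro ⟨p, ⟨k, hk, rfl⟩, hp⟩
    simp only [zero_add] at hp ⊢
    by_cases he : l[k] = e
    · refine ⟨k, ?_, hk, he⟩
      simp [he] at hp
      omega
    · simp [he] at hp
  · rintro ⟨k, rfl, hk, he⟩
    exact ⟨((k : Int), e), ⟨k, hk, by simp [he]⟩, by simp⟩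

lemma occList_sorted (l : List Char) (e : Char) : (occList l e).Pairwise (· < ·) := by
  unfold occList
  apply List.Pairwise.filterMap _ ?_ (PySem.List.pairwise_lt_enumerate l 0)
  intro p q hpq x hx y hy
  by_cases hp : p.2 = e <;> simp [hp] at hx
  by_cases hq : q.2 = e <;> simp [hq] at hy
  omega

lemma filter_split_sorted (O : List Int) (h : O.Pairwise (· < ·)) (s m : Int)
    (hm : m ∈ O) (hsm : s ≤ m) (hmin : ∀ x ∈ O, s ≤ x → m ≤ x) :
    O.filter (fun x => decide (s ≤ x)) = m :: O.filter (fun x => decide (m + 1 ≤ x)) := by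
  induction O with
  | nil => simp at hm
  | cons a t ih =>
    rcases List.pairwise_cons.mp h with ⟨hat, ht⟩
    by_cases ham : a = m
    · subst ham
      have hall : ∀ x ∈ t, (decide (s ≤ x)) = (decide (a + 1 ≤ x)) := by
        intro x hx
        have := hat x hx
        simp only [decide_eq_decide]
        omega
      simp only [List.filter_cons, decide_eq_true_eq]
      rw [if_pos hsm, if_neg (by omega), List.filter_congr hall]
    · have hmt : m ∈ t := by
        rcases List.mem_cons.mp hm with h1 | h1
        · exact absurd h1.symm ham
        · exact h1
      have has : ¬ s ≤ a := by
        intro hsa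
        have := hmin a (by simp) hsa
        have := hat m hmt
        omega
      simp only [List.filter_cons, decide_eq_true_eq]
      rw [if_neg has, if_neg (by have := hat m hmt; omega)]
      exact ih ht hmt (fun x hx hsx => hmin x (by simp [hx]) hsx)

lemma mem_drop_iff (l : List Char) (e : Char) (d : Nat) :
    e ∈ l.drop d ↔ ∃ (k : Nat), d ≤ k ∧ ∃ (hk : k < l.length), l[k] = e := by
  rw [List.mem_iff_getElem]
  constructor
  · rintro ⟨i, hi, hie⟩
    have hi' : d + i < l.length := by simp at hi; omega
    refine ⟨d + i, by omega, hi', ?_⟩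
    rw [← List.getElem_drop]
    exact hie
  · rintro ⟨k, hdk, hk, hke⟩
    have hlen : k - d < (l.drop d).length := by simp; omega
    refine ⟨k - d, hlen, ?_⟩
    rw [List.getElem_drop]
    simpa [show d + (k - d) = k by omega] using hke

lemma idxFrom_none_iff {l : List Char} {e : Char} {t : Int} (ht : 0 ≤ t) :
    idxFrom l e t = none ↔ ∀ x ∈ occList l e, ¬ t ≤ x := by
  have hmap : idxFrom l e t = none ↔ PySem.List.index? (l.drop t.toNat) e = none := by
    unfold idxFrom
    cases PySem.List.index? (l.drop t.toNat) e <;> simp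
  rw [hmap, PySem.List.index?_eq_none_iff]
  constructor
  · intro hno x hx htx
    obtain ⟨k, rfl, hk, he⟩ := mem_occList.mp hx
    exact hno ((mem_drop_iff l e t.toNat).mpr ⟨k, by omega, hk, he⟩)
  · intro hno hmem
    obtain ⟨k, hdk, hk, hke⟩ := (mem_drop_iff l e t.toNat).mp hmem
    exact hno ((k : Int)) (mem_occList.mpr ⟨k, rfl, hk, hke⟩) (by omega)

lemma idxFrom_some {l : List Char} {e : Char} {t : Int} {j : Int} (ht : 0 ≤ t)
    (h : idxFrom l e t = some j) :
    j ∈ occList l e ∧ t ≤ j ∧ ∀ x ∈ occList l e, t ≤ x → j ≤ x := by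
  unfold idxFrom at h
  cases hidx : PySem.List.index? (l.drop t.toNat) e with
  | none => rw [hidx] at h; exact absurd h (by simp)
  | some k =>
    rw [hidx] at h
    have hj : j = t + (k : Int) := by
      have : some (t + (k : Int)) = some j := h
      exact (Option.some.injEq _ _ ▸ this).symm ▸ rfl
    subst hj
    obtain ⟨hk, hke, hmin⟩ := PySem.List.getElem_of_index?_eq_some hidx
    have hklen : t.toNat + k < l.length := by simp at hk; omega
    refine ⟨?_, by omega, ?_⟩
    · apply mem_occList.mpr
      refine ⟨t.toNat + k, by omega, hklen, ?_⟩
      rw [← List.getElem_drop]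
      exact hke
    · intro x hx htx
      obtain ⟨i, rfl, hi, hie⟩ := mem_occList.mp hx
      by_contra hlt
      have hikt : i - t.toNat < k := by omega
      have hget : (l.drop t.toNat)[i - t.toNat]'(by simp; omega) = e := by
        rw [List.getElem_drop]
        simpa [show t.toNat + (i - t.toNat) = i by omega] using hie
      exact hmin (i - t.toNat) hikt hget

lemma occList_nonneg (l : List Char) (e : Char) : ∀ x ∈ occList l e, 0 ≤ x := by
  intro x hx
  obtain ⟨k, rfl, _, _⟩ := mem_occList.mp hx
  omega

lemma indicesLoop_eq (l : List Char) (e : Char) :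
    ∀ (fuel : Nat) (offset : Int) (acc : List Int), -1 ≤ offset →
      ((occList l e).filter (fun x => decide (offset + 1 ≤ x))).length ≤ fuel →
      indicesLoop l e fuel offset acc = acc ++ (occList l e).filter (fun x => decide (offset + 1 ≤ x)) := by
  intro fuel
  induction fuel with
  | zero =>
    intro offset acc hoff hlen
    have hnil : (occList l e).filter (fun x => decide (offset + 1 ≤ x)) = [] :=
      List.length_eq_zero_iff.mp (by omega)
    rw [hnil, indicesLoop]
    simp
  | succ fuel ih =>
    intro offset acc hoff hlen
    rw [indicesLoop]
    cases hidx : idxFrom l e (offset + 1) with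
    | none =>
      have hnil : (occList l e).filter (fun x => decide (offset + 1 ≤ x)) = [] := by
        rw [List.filter_eq_nil_iff]
        intro x hx
        simp only [decide_eq_true_eq]
        exact (idxFrom_none_iff (by omega)).mp hidx x hx
      rw [hnil]
      simp
    | some j =>
      obtain ⟨hjmem, hjt, hjmin⟩ := idxFrom_some (by omega) hidx
      have hsplit := filter_split_sorted (occList l e) (occList_sorted l e) (offset + 1) j
        hjmem hjt hjmin
      rw [hsplit] at hlen ⊢
      show indicesLoop l e fuel j (acc ++ [j]) = acc ++ j :: (occList l e).filter (fun x => decide (j + 1 ≤ x))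
      rw [ih j (acc ++ [j]) (by omega) (by rw [List.length_cons] at hlen; omega)]
      simp

theorem helper_sum_foldl (n : Int) (L : List (Int × Char)) :
    ∀ c : Int, L.foldl (fun t p => if p.2 = '#' then t + (p.1 - n) else t) c
      = c + (L.filterMap (fun p => if p.2 = '#' then some (p.1 - n) else none)).sum := by
  induction L with
  | nil => intro c; simp
  | cons p t ih =>
    intro c
    by_cases hp : p.2 = '#' <;> simp [hp, ih, add_assoc]

lemma occList_length_le (l : List Char) (e : Char) : (occList l e).length ≤ l.length := by
  unfold occList
  calc ((PySem.List.enumerate l 0).filterMap _).length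
      ≤ (PySem.List.enumerate l 0).length := List.length_filterMap_le _ _
    _ = l.length := PySem.List.length_enumerate l 0

lemma indicesA_eq_occList (l : List Char) (e : Char) : indicesA l e = occList l e := by
  unfold indicesA
  rw [indicesLoop_eq l e (l.length + 1) (-1) [] (by omega)
      (le_trans (List.length_filter_le _ _) (by have := occList_length_le l e; omega)),
    List.nil_append]
  apply List.filter_eq_self.mpr
  intro x hx
  simp only [decide_eq_true_eq]
  have := occList_nonneg l e x hx
  omega

-- ===== VERDICT (by name: the statement is the Claim_ definition above) =====
theorem count_num_index_spec : Claim_equal_count_num_index := by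
  intro s rules n _
  unfold Spec_count_num_index count_num_index count_num_index_alt
  have hstep : stepA rules = stepB rules := funext (stepA_eq_stepB rules)
  rw [foldl_const_iterate (stepA rules), PySem.List.length_pyRange_one, hstep,
    show n - 0 = n by ring]
  have hB := bLoop_eq rules n s.toList n.toNat 0 PySem.Dict.empty (by omega) (by omega)
    (by intro k v h; rw [PySem.Dict.get?_empty] at h; exact absurd h (by simp))
  simp only [Nat.cast_zero, Function.iterate_zero_apply] at hB
  rw [hB]
  show (List.map (fun idx => idx - n) (indicesA ((stepB rules)^[n.toNat] s.toList) '#')).sum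
    = List.foldl (fun t p => if p.2 = '#' then t + (p.1 - n) else t) 0
        (PySem.List.enumerate ((stepB rules)^[n.toNat] s.toList) 0)
  rw [indicesA_eq_occList, helper_sum_foldl n (PySem.List.enumerate ((stepB rules)^[n.toNat] s.toList) 0) 0,
    zero_add]
  unfold occList
  rw [List.map_filterMap]
  have hfun : (fun x : Int × Char => Option.map (fun idx => idx - n) (if x.2 = '#' then some x.1 else none))
      = (fun p : Int × Char => if p.2 = '#' then some (p.1 - n) else none) := by
    funext p
    by_cases hp : p.2 = '#' <;> simp [hp]
  rw [hfun]
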